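-- pv_equiv track=rewrite | github.com/RichardScottOZ/geophysics-data-reverse-engineering | geodatarev/cloud_storage.py | parse_cloud_uri
-- ===== SOURCE A (Python) =====
-- def parse_cloud_uri(uri: str) -> tuple[str, str, str]:
--     """Parse a cloud storage URI into ``(scheme, bucket, prefix)``.
--
--     Supported schemes
--     -----------------
--     * ``s3://bucket/prefix``
--     * ``az://container/prefix``  (Azure Blob Storage)
--
--     Returns
--     -------
--     tuple[str, str, str]
--         ``(scheme, bucket_or_container, prefix)``
--
--     Raises
--     ------
--     ValueError
--         If the URI scheme is not recognised.
--     """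
--     for scheme in ("s3://", "az://"):
--         if uri.startswith(scheme):
--             rest = uri[len(scheme):]
--             parts = rest.split("/", 1)
--             bucket = parts[0]
--             prefix = parts[1] if len(parts) > 1 else ""
--             return scheme.rstrip(":/"), bucket, prefix
--     raise ValueError(
--         f"Unsupported cloud URI scheme: {uri!r}. Use 's3://' or 'az://'."
--     )
-- ===== SOURCE B (Python) =====
-- def parse_cloud_uri(uri: str) -> tuple[str, str, str]:
--     """Parse a cloud storage URI into (scheme, bucket, prefix)."""
--     idx = uri.find("://")
--     scheme = uri[:idx]
--     if idx == -1 or scheme not in ("s3", "az"):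
--         raise ValueError(
--             f"Unsupported cloud URI scheme: {uri!r}. Use 's3://' or 'az://'."
--         )
--     parts = uri[idx + 3:].split("/", 1)
--     bucket = parts[0]
--     prefix = parts[1] if len(parts) > 1 else ""
--     return scheme, bucket, prefix
-- ===== Notes on version B (the rewrite author's own statement) =====
-- stated objective: idiomatic
-- what changed: Replaces the loop over candidate prefixes with startswith and rstrip by structural parsing: find the first '://', take the text before it as the scheme, and validate it by membership in {'s3','az'}.
import Mathlib
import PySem

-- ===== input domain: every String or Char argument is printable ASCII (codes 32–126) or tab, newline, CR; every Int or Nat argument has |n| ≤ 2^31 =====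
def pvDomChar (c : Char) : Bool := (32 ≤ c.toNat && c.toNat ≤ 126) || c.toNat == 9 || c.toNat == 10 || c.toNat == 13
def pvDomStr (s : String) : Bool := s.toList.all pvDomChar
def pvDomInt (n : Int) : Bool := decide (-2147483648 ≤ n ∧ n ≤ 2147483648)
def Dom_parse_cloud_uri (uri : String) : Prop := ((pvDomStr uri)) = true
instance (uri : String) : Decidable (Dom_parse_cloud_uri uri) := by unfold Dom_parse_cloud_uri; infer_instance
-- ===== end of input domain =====

-- B parses the URI structurally (first '://' + scheme membership) instead of A's loop over candidate prefixes with startswith/rstrip; same values on every accepted URI.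


-- ===== PORT A =====
-- scheme.rstrip(":/") ported by hand (PySem has no rstrip-with-chars): drop trailing ':' and '/' characters — exact on all strings
def pvRstripColonSlash (s : String) : String :=
  String.ofList ((s.toList.reverse.dropWhile (fun c => c == ':' || c == '/')).reverse)

-- the 'for scheme in ("s3://", "az://")' loop: first matching scheme wins, none = the final raise
def pvSchemeLoop (uri : String) : List String → Option (String × String × String)
  | [] => none
  | scheme :: schemes =>
    if PySem.Str.startswith uri scheme then
      let rest := PySem.Str.slice uri (some (PySem.Str.len scheme)) none
      let parts := (PySem.Str.splitMax? rest "/" 1).getD []   -- sep "/" ≠ "", never none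
      let bucket := parts.getD 0 ""                            -- parts[0]: split never returns []
      let pfx := if parts.length > 1 then parts.getD 1 "" else ""
      some (pvRstripColonSlash scheme, bucket, pfx)
    else pvSchemeLoop uri schemes

def parse_cloud_uri (uri : String) : String × String × String :=
  (pvSchemeLoop uri ["s3://", "az://"]).getD ("", "", "")   -- none = ValueError, excluded by Pre_

-- ===== PORT B =====
def parse_cloud_uri_alt (uri : String) : String × String × String :=
  let idx := PySem.Str.find uri "://"
  let scheme := PySem.Str.slice uri none (some idx)
  if idx == -1 || !(scheme == "s3" || scheme == "az") then
    ("", "", "")   -- ValueError, excluded by Pre_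
  else
    let parts := (PySem.Str.splitMax? (PySem.Str.slice uri (some (idx + 3)) none) "/" 1).getD []
    (scheme, parts.getD 0 "", if parts.length > 1 then parts.getD 1 "" else "")

-- ===== PRECONDITION & SPEC =====
-- Pre_ excludes exactly the URIs not starting with "s3://" or "az://": there A (and B) raises ValueError.
def Pre_parse_cloud_uri (uri : String) : Prop :=
  PySem.Str.startswith uri "s3://" = true ∨ PySem.Str.startswith uri "az://" = true
instance (uri : String) : Decidable (Pre_parse_cloud_uri uri) := by unfold Pre_parse_cloud_uri; infer_instance

def pvWitness_parse_cloud_uri : String := "s3://bucket/some/key"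

def Spec_parse_cloud_uri (uri : String) (out : String × String × String) : Prop := out = parse_cloud_uri_alt uri
instance (uri : String) (out : String × String × String) : Decidable (Spec_parse_cloud_uri uri out) := by unfold Spec_parse_cloud_uri; infer_instance

-- ===== CLAIM (what is proved, stated in full; the proofs are below) =====
def Claim_equal_parse_cloud_uri : Prop := ∀ (uri : String), Dom_parse_cloud_uri uri → Pre_parse_cloud_uri uri → Spec_parse_cloud_uri uri (parse_cloud_uri uri)

-- ===== LEMMAS AND PROOFS =====

-- on any URI of the form <c1><c2>://…, the FIRST occurrence of "://" is at index 2
lemma find_sep_eq_two (uri : String) (c1 c2 : Char) (t : List Char)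
    (h : uri.toList = c1 :: c2 :: ':' :: '/' :: '/' :: t) :
    PySem.Str.find uri "://" = 2 := by
  have hsub : ("://" : String).toList = [':', '/', '/'] := rfl
  have hinfix : [':', '/', '/'] <:+: uri.toList := ⟨[c1, c2], t, by simp [h]⟩
  have h0 : 0 ≤ PySem.Chars.find uri.toList [':', '/', '/'] :=
    (PySem.Chars.find_nonneg_iff _ _).mpr hinfix
  obtain ⟨hpre, hmin⟩ := PySem.Chars.find_spec h0
  set n := (PySem.Chars.find uri.toList [':', '/', '/']).toNat with hn
  have hle : n ≤ 2 := by
    by_contra hgt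
    exact hmin 2 (by omega) (by simp [h])
  interval_cases n
  · simp [h, List.cons_prefix_cons] at hpre
  · simp [h, List.cons_prefix_cons] at hpre
  · have : PySem.Chars.find uri.toList [':', '/', '/'] = 2 := by omega
    simpa [PySem.Str.find, hsub] using this

lemma rstrip_s3 : pvRstripColonSlash "s3://" = "s3" := by decide
lemma rstrip_az : pvRstripColonSlash "az://" = "az" := by decide

theorem parse_cloud_uri_spec : Claim_equal_parse_cloud_uri := by
  intro uri _ hpre
  unfold Spec_parse_cloud_uri parse_cloud_uri parse_cloud_uri_alt pvSchemeLoop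
  rcases hpre with hs | hs
  · have ht : ∃ t, uri.toList = 's' :: '3' :: ':' :: '/' :: '/' :: t := by
      obtain ⟨t, hcat⟩ := (PySem.Chars.startswith_iff uri.toList ("s3://").toList).mp
        (by rw [← PySem.Str.startswith_eq]; exact hs)
      exact ⟨t, by rw [← hcat]; rfl⟩
    obtain ⟨t, ht⟩ := ht
    have hfind := find_sep_eq_two uri 's' '3' t ht
    have hcs : PySem.Chars.startswith uri.toList ['s', '3', ':', '/', '/'] = true := by
      rw [PySem.Chars.startswith_iff]; exact ⟨t, ht.symm⟩
    have hscheme : PySem.Str.slice uri none (some 2) = "s3" := by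
      apply String.toList_inj.mp
      simp [PySem.List.slice_to, ht]
    rw [hfind]
    simp [hcs, hscheme, rstrip_s3, show (2 : Int) + 3 = 5 from by norm_num]
  · have ht : ∃ t, uri.toList = 'a' :: 'z' :: ':' :: '/' :: '/' :: t := by
      obtain ⟨t, hcat⟩ := (PySem.Chars.startswith_iff uri.toList ("az://").toList).mp
        (by rw [← PySem.Str.startswith_eq]; exact hs)
      exact ⟨t, by rw [← hcat]; rfl⟩
    obtain ⟨t, ht⟩ := ht
    have hfind := find_sep_eq_two uri 'a' 'z' t ht
    have hcs3 : PySem.Chars.startswith uri.toList ['s', '3', ':', '/', '/'] = false := by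
      simp only [ht]
      simp [PySem.Chars.startswith, List.isPrefixOf]
    have hcaz : PySem.Chars.startswith uri.toList ['a', 'z', ':', '/', '/'] = true := by
      rw [PySem.Chars.startswith_iff]; exact ⟨t, ht.symm⟩
    have hscheme : PySem.Str.slice uri none (some 2) = "az" := by
      apply String.toList_inj.mp
      simp [PySem.List.slice_to, ht]
    rw [hfind]
    simp [pvSchemeLoop, hcs3, hcaz, hscheme, rstrip_az, show (2 : Int) + 3 = 5 from by norm_num]
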